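-- pv_equiv track=rewrite | github.com/ablodge/leamr | ccg/load_ccg.py | align_indices
-- ===== SOURCE A (Python) =====
-- def align_indices(tokens1, tokens2):
--     map = {}
--     offset = 0
--     for i,t in enumerate(tokens1):
--         if tokens2[i+offset]==t or not t:
--             map[i] = i+offset
--         elif t in tokens2[i+offset:]:
--             while tokens2[i+offset]!=t:
--                 offset+=1
--             map[i] = i + offset
--         elif any(t2.startswith(t) for t2 in tokens2[i+offset:]):
--             while not tokens2[i+offset].startswith(t):
--                 offset+=1
--             map[i] = i + offset
--         else:
--             raise Exception('Failed to align:\n',tokens1,'\n',tokens2)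
--     # pairs = [(tokens1[t],tokens2[t2]) for t,t2 in map.items()]
--     return map
-- ===== SOURCE B (Python) =====
-- def align_indices(tokens1, tokens2):
--     # Index tokens2 once: token -> ascending list of its positions.
--     positions = {}
--     for p, s in enumerate(tokens2):
--         positions.setdefault(s, []).append(p)
--     n = len(tokens2)
--     result = {}
--     j = 0
--     for i, t in enumerate(tokens1):
--         if j < n and (t == "" or tokens2[j] == t):
--             k = j
--         else:
--             lst = positions.get(t, [])
--             lo, hi = 0, len(lst)
--             while lo < hi:                     # leftmost occurrence >= j
--                 mid = (lo + hi) // 2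
--                 if lst[mid] < j:
--                     lo = mid + 1
--                 else:
--                     hi = mid
--             if lo < len(lst):
--                 k = lst[lo]
--             else:
--                 k = next((p for p in range(j, n) if tokens2[p].startswith(t)), None)
--                 if k is None:
--                     raise Exception('Failed to align:\n', tokens1, '\n', tokens2)
--         result[i] = k
--         j = k + 1
--     return result
-- ===== Notes on version B (the rewrite author's own statement) =====
-- stated objective: alternative
-- what changed: B builds a token->positions index of tokens2 once and, after a constant-time check of the current position, bisects that token's ascending occurrence list for the next exact match (falling back to a single forward scan for the rare prefix-match case), instead of A's per-token slicing of tokens2 with a membership test plus a while-loop rescan.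
import Mathlib
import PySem

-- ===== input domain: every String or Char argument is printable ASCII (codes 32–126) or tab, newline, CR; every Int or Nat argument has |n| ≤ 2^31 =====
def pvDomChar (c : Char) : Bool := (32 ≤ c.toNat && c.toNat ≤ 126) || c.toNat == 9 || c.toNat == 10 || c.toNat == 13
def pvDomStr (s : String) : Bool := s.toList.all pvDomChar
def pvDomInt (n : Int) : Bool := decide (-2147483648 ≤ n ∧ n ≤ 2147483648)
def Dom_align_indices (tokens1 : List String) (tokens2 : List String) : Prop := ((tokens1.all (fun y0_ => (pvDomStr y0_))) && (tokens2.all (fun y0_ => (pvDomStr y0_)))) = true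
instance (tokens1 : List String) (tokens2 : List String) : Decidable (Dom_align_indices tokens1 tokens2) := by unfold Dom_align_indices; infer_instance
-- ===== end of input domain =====

-- B replaces A's per-token slice+membership rescans by a positions index of tokens2 built once
-- (token -> ascending occurrence list), consulted by bisection from a forward pointer (objective: alternative).

-- ===== PORT A =====
-- the 'while tokens2[i+offset] != t / does not startswith t: offset += 1' loops of A;
-- fuel (= len(tokens2)) only makes the recursion structural: under Pre_ the stop condition
-- is hit before the fuel runs out, so this computes exactly what the Python while computes.
def alignAWhile (tokens2 : List String) (P : String → Bool) (i : Int) (offset : Int) : Nat → Int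
  | 0 => offset
  | fuel+1 =>
    match PySem.List.pyGet? tokens2 (i + offset) with
    | some s => if P s then offset else alignAWhile tokens2 P i (offset + 1) fuel
    | none => offset          -- IndexError: excluded by Pre_

def alignAGo (tokens2 : List String) : List String → Int → Int → List (Int × Int) → List (Int × Int)
  | [], _, _, acc => acc
  | t :: ts, i, offset, acc =>
    match PySem.List.pyGet? tokens2 (i + offset) with
    | none => acc             -- IndexError: excluded by Pre_
    | some s =>
      if s = t ∨ t = "" then
        alignAGo tokens2 ts (i + 1) offset (acc ++ [(i, i + offset)])
      else if (PySem.List.slice tokens2 (some (i + offset)) none).contains t then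
        let offset' := alignAWhile tokens2 (fun s2 => s2 == t) i offset tokens2.length
        alignAGo tokens2 ts (i + 1) offset' (acc ++ [(i, i + offset')])
      else if (PySem.List.slice tokens2 (some (i + offset)) none).any (fun t2 => PySem.Str.startswith t2 t) then
        let offset' := alignAWhile tokens2 (fun t2 => PySem.Str.startswith t2 t) i offset tokens2.length
        alignAGo tokens2 ts (i + 1) offset' (acc ++ [(i, i + offset')])
      else acc                -- 'Failed to align' Exception: excluded by Pre_

def align_indices (tokens1 : List String) (tokens2 : List String) : List (Int × Int) :=
  alignAGo tokens2 tokens1 0 0 []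

-- ===== PORT B =====
-- positions.setdefault(s, []).append(p) over enumerate(tokens2)
def buildPositions (tokens2 : List String) : PySem.Dict String (List Int) :=
  (PySem.List.enumerate tokens2).foldl (fun d ps => d.modify ps.2 [] (· ++ [ps.1])) PySem.Dict.empty

-- the hand-written 'while lo < hi' bisection of Source B; fuel (= len(lst) + 1) only makes the
-- recursion structural: hi - lo shrinks at every step, so the fuel never runs out
def bisectGE (lst : List Int) (j : Int) : Nat → Nat → Nat → Nat
  | lo, _, 0 => lo
  | lo, hi, fuel + 1 =>
    if lo < hi then
      match lst[(lo + hi) / 2]? with        -- mid := (lo + hi) // 2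
      | some v => if v < j then bisectGE lst j ((lo + hi) / 2 + 1) hi fuel else bisectGE lst j lo ((lo + hi) / 2) fuel
      | none => lo            -- unreachable: mid < hi ≤ len lst
    else lo

def alignBGo (tokens2 : List String) (pos : PySem.Dict String (List Int)) :
    List String → Int → Int → List (Int × Int) → List (Int × Int)
  | [], _, _, acc => acc
  | t :: ts, i, j, acc =>
    if j < (tokens2.length : Int) ∧ (t = "" ∨ PySem.List.pyGet? tokens2 j = some t) then
      alignBGo tokens2 pos ts (i + 1) (j + 1) (acc ++ [(i, j)])
    else
      let lst := pos.getD t []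
      let lo := bisectGE lst j 0 lst.length (lst.length + 1)
      match lst[lo]? with
      | some k => alignBGo tokens2 pos ts (i + 1) (k + 1) (acc ++ [(i, k)])
      | none =>
        match (PySem.List.pyRange j (tokens2.length : Int) 1).find? (fun p =>
            match PySem.List.pyGet? tokens2 p with
            | some s2 => PySem.Str.startswith s2 t
            | none => false) with
        | some k => alignBGo tokens2 pos ts (i + 1) (k + 1) (acc ++ [(i, k)])
        | none => acc         -- 'Failed to align' Exception: excluded by Pre_

def align_indices_alt (tokens1 : List String) (tokens2 : List String) : List (Int × Int) :=
  alignBGo tokens2 (buildPositions tokens2) tokens1 0 0 []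

-- ===== PRECONDITION & SPEC =====
-- the greedy match position for token t searching tokens2 from position j (A's loop body without the bookkeeping)
def nextIdx (tokens2 : List String) (t : String) (j : Nat) : Option Nat :=
  if h : j < tokens2.length then
    if tokens2[j] = t ∨ t = "" then some j
    else match (tokens2.drop j).findIdx? (fun s => s == t) with
      | some d => some (j + d)
      | none => match (tokens2.drop j).findIdx? (fun s => PySem.Str.startswith s t) with
        | some d => some (j + d)
        | none => none
  else none

def preGo (tokens2 : List String) : List String → Nat → Bool
  | [], _ => true
  | t :: ts, j => match nextIdx tokens2 t j with
    | some k => preGo tokens2 ts (k + 1)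
    | none => false

-- Pre_ holds exactly when A returns normally: every token of tokens1 finds its greedy match inside
-- tokens2 (otherwise A raises IndexError or the explicit 'Failed to align' Exception). A's domain is
-- inherently this alignability condition; nextIdx states it declaratively as "the first exact
-- (else prefix) occurrence at or after j" via List.findIdx?, shared by neither port's code.
def Pre_align_indices (tokens1 : List String) (tokens2 : List String) : Prop :=
  preGo tokens2 tokens1 0 = true
instance (tokens1 : List String) (tokens2 : List String) : Decidable (Pre_align_indices tokens1 tokens2) := by unfold Pre_align_indices; infer_instance

def pvWitness_align_indices : List String × List String := (["a", "b"], ["a", "x", "b"])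

def Spec_align_indices (tokens1 : List String) (tokens2 : List String) (out : List (Int × Int)) : Prop := out = align_indices_alt tokens1 tokens2
instance (tokens1 : List String) (tokens2 : List String) (out : List (Int × Int)) : Decidable (Spec_align_indices tokens1 tokens2 out) := by unfold Spec_align_indices; infer_instance

-- ===== CLAIM (what is proved, stated in full; the proofs are below) =====
def Claim_equal_align_indices : Prop := ∀ (tokens1 : List String) (tokens2 : List String), Dom_align_indices tokens1 tokens2 → Pre_align_indices tokens1 tokens2 → Spec_align_indices tokens1 tokens2 (align_indices tokens1 tokens2)

-- ===== LEMMAS AND PROOFS =====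

-- the ascending list of positions (offset by p) at which t occurs in l
def posFrom (t : String) : List String → Nat → List Int
  | [], _ => []
  | s :: l, p => if s = t then (p : Int) :: posFrom t l (p + 1) else posFrom t l (p + 1)

lemma buildPositions_getD (tokens2 : List String) (t : String) :
    (buildPositions tokens2).getD t [] = posFrom t tokens2 0 := by
  have haux : ∀ (l : List String) (p : Nat),
      (((PySem.List.enumerate l (p : Int)).map (fun ps => (ps.2, ps.1))).filter
          (fun q => q.1 == t)).map (·.2) = posFrom t l p := by
    intro l
    induction l with
    | nil => intro p; simp [PySem.List.enumerate_nil, posFrom]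
    | cons s l ih =>
      intro p
      have hp1 : ((p : Int) + 1) = ((p + 1 : Nat) : Int) := by push_cast; ring
      rw [PySem.List.enumerate_cons, List.map_cons, List.filter_cons]
      simp only [posFrom]
      by_cases hst : s = t
      · rw [if_pos (by simpa using hst), List.map_cons, if_pos hst, hp1, ih (p + 1)]
      · rw [if_neg (by simpa using hst), if_neg hst, hp1, ih (p + 1)]
  unfold buildPositions
  have hfold : (PySem.List.enumerate tokens2).foldl
      (fun d ps => d.modify ps.2 [] (· ++ [ps.1])) PySem.Dict.empty
      = ((PySem.List.enumerate tokens2).map (fun ps => (ps.2, ps.1))).foldl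
          (fun d q => d.modify q.1 [] (· ++ [q.2])) PySem.Dict.empty := by
    rw [List.foldl_map]
  rw [hfold, PySem.Dict.getD_foldl_modify_append, PySem.Dict.getD_empty]
  simpa using haux tokens2 0

lemma posFrom_ge (t : String) (l : List String) (p : Nat) :
    ∀ x ∈ posFrom t l p, (p : Int) ≤ x := by
  induction l generalizing p with
  | nil => simp [posFrom]
  | cons s l ih =>
    intro x hx
    simp only [posFrom] at hx
    split at hx
    · rcases List.mem_cons.mp hx with h | h
      · omega
      · have := ih (p + 1) x h; push_cast at this ⊢; omega
    · have := ih (p + 1) x hx; push_cast at this ⊢; omega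

lemma posFrom_append (t : String) (l₁ l₂ : List String) (p : Nat) :
    posFrom t (l₁ ++ l₂) p = posFrom t l₁ p ++ posFrom t l₂ (p + l₁.length) := by
  induction l₁ generalizing p with
  | nil => simp [posFrom]
  | cons s l ih =>
    have harith : p + 1 + l.length = p + (s :: l).length := by simp; omega
    by_cases hst : s = t
    · simp [posFrom, hst, ih (p + 1), harith]
    · simp [posFrom, hst, ih (p + 1), harith]

lemma posFrom_lt (t : String) (l : List String) (p : Nat) :
    ∀ x ∈ posFrom t l p, x < (p : Int) + l.length := by
  induction l generalizing p with
  | nil => simp [posFrom]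
  | cons s l ih =>
    intro x hx
    simp only [posFrom] at hx
    simp only [List.length_cons]
    split at hx
    · rcases List.mem_cons.mp hx with h | h
      · subst h; push_cast; omega
      · have := ih (p + 1) x h; push_cast at this ⊢; omega
    · have := ih (p + 1) x hx; push_cast at this ⊢; omega

lemma head?_posFrom (t : String) (l : List String) (p : Nat) :
    (posFrom t l p).head? = ((l.findIdx? (fun s => s == t)).map (fun d => ((p + d : Nat) : Int))) := by
  induction l generalizing p with
  | nil => simp [posFrom]
  | cons s l ih =>
    by_cases hst : s = t
    · simp [posFrom, hst, List.findIdx?_cons]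
    · rw [show posFrom t (s :: l) p = posFrom t l (p + 1) from by simp [posFrom, hst]]
      rw [List.findIdx?_cons]
      rw [show (s == t) = false by simp [hst]]
      simp only [Bool.false_eq_true, if_false]
      rw [ih (p + 1)]
      cases h : l.findIdx? (fun s => s == t) with
      | none => simp
      | some d => simp; omega

lemma find?_eq_head?_of_forall (l : List Int) (p : Int → Bool) (h : ∀ x ∈ l, p x = true) :
    l.find? p = l.head? := by
  cases l with
  | nil => rfl
  | cons a l => simp [List.find?, h a (by simp)]

lemma find_positions (tokens2 : List String) (t : String) (j : Nat) (hj : j ≤ tokens2.length) :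
    ((buildPositions tokens2).getD t []).find? (fun p => (j : Int) ≤ p)
      = (((tokens2.drop j).findIdx? (fun s => s == t)).map (fun d => ((j + d : Nat) : Int))) := by
  rw [buildPositions_getD]
  rw [show posFrom t tokens2 0 = posFrom t (tokens2.take j ++ tokens2.drop j) 0 from by
    rw [List.take_append_drop]]
  rw [posFrom_append, List.find?_append]
  have hlen : (tokens2.take j).length = j := by simp [List.length_take]; omega
  have h1 : (posFrom t (tokens2.take j) 0).find? (fun p => (j : Int) ≤ p) = none := by
    rw [List.find?_eq_none]
    intro x hx
    have := posFrom_lt t (tokens2.take j) 0 x hx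
    rw [hlen] at this
    simp at this ⊢
    omega
  rw [h1, Option.none_or, hlen]
  rw [find?_eq_head?_of_forall _ _ (by
    intro x hx
    have := posFrom_ge t (tokens2.drop j) (0 + j) x hx
    simpa using this)]
  rw [head?_posFrom]
  simp

lemma alignAWhile_eq (tokens2 : List String) (P : String → Bool) :
    ∀ (fuel : Nat) (i off : Int) (j d : Nat), i + off = (j : Int) →
      (tokens2.drop j).findIdx? P = some d → d < fuel →
      alignAWhile tokens2 P i off fuel = off + d := by
  intro fuel
  induction fuel with
  | zero => intro i off j d _ _ h; omega
  | succ fuel ih =>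
    intro i off j d hij hfind hd
    have hdlen : d < (tokens2.drop j).length := (List.findIdx?_eq_some_iff_findIdx_eq.mp hfind).1
    have hjlen : j < tokens2.length := by rw [List.length_drop] at hdlen; omega
    have hdrop : tokens2[j] :: tokens2.drop (j + 1) = tokens2.drop j := List.getElem_cons_drop hjlen
    have hget : PySem.List.pyGet? tokens2 (i + off) = some tokens2[j] := by
      rw [hij]
      simp [List.getElem?_eq_getElem hjlen]
    rw [← hdrop, List.findIdx?_cons] at hfind
    unfold alignAWhile
    rw [hget]
    dsimp only
    cases hPP : P tokens2[j] with
    | true =>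
      rw [hPP] at hfind
      simp at hfind
      simp
      omega
    | false =>
      rw [hPP] at hfind
      simp at hfind
      obtain ⟨d', hd', hdd⟩ := hfind
      simp only [Bool.false_eq_true, if_false]
      rw [ih i (off + 1) (j + 1) d' (by push_cast; omega) hd' (by omega)]
      omega

lemma find_range (tokens2 : List String) (P : String → Bool) :
    ∀ (k j : Nat), j + k = tokens2.length →
      ((PySem.List.pyRange (j : Int) (tokens2.length : Int) 1).find? (fun p =>
          match PySem.List.pyGet? tokens2 p with
          | some s2 => P s2
          | none => false))
        = (((tokens2.drop j).findIdx? P).map (fun d => ((j + d : Nat) : Int))) := by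
  intro k
  induction k with
  | zero =>
    intro j hjk
    rw [PySem.List.pyRange_one_eq_nil (by omega), List.drop_eq_nil_of_le (by omega)]
    simp
  | succ k ih =>
    intro j hjk
    have hjlen : j < tokens2.length := by omega
    have hdrop : tokens2[j] :: tokens2.drop (j + 1) = tokens2.drop j := List.getElem_cons_drop hjlen
    rw [PySem.List.pyRange_one_cons (by exact_mod_cast hjlen)]
    have hget : PySem.List.pyGet? tokens2 ((j : Nat) : Int) = some tokens2[j] := by
      simp [List.getElem?_eq_getElem hjlen]
    rw [List.find?_cons]
    rw [← hdrop, List.findIdx?_cons]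
    cases hPP : P tokens2[j] with
    | true => simp [hget, hPP]
    | false =>
      rw [show (match PySem.List.pyGet? tokens2 ((j : Nat) : Int) with
          | some s2 => P s2
          | none => false) = false from by rw [hget]; simpa using hPP]
      dsimp only
      simp only [Bool.false_eq_true, if_false]
      rw [show ((j : Int) + 1) = ((j + 1 : Nat) : Int) from by push_cast; ring]
      rw [ih (j + 1) (by omega)]
      cases h : (tokens2.drop (j + 1)).findIdx? P with
      | none => simp
      | some d => simp; omega

lemma posFrom_pairwise (t : String) (l : List String) (p : Nat) :
    (posFrom t l p).Pairwise (· < ·) := by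
  induction l generalizing p with
  | nil => exact List.Pairwise.nil
  | cons s l ih =>
    by_cases hst : s = t
    · rw [show posFrom t (s :: l) p = (p : Int) :: posFrom t l (p + 1) from by simp [posFrom, hst]]
      exact List.pairwise_cons.mpr ⟨fun x hx => by
        have := posFrom_ge t l (p + 1) x hx; push_cast at this ⊢; omega, ih (p + 1)⟩
    · rw [show posFrom t (s :: l) p = posFrom t l (p + 1) from by simp [posFrom, hst]]
      exact ih (p + 1)

lemma bisect_go (lst : List Int) (j : Int) (hs : lst.Pairwise (· < ·)) :
    ∀ (fuel lo hi : Nat), lo ≤ hi → hi ≤ lst.length → hi - lo ≤ fuel →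
      (∀ (a : Nat) (ha : a < lst.length), a < lo → lst[a] < j) →
      (∀ (b : Nat) (hb : b < lst.length), hi ≤ b → j ≤ lst[b]) →
      (∀ (a : Nat) (ha : a < lst.length), a < bisectGE lst j lo hi fuel → lst[a] < j) ∧
      (∀ (b : Nat) (hb : b < lst.length), bisectGE lst j lo hi fuel ≤ b → j ≤ lst[b]) := by
  have hsg := List.pairwise_iff_getElem.mp hs
  intro fuel
  induction fuel with
  | zero =>
    intro lo hi hlohi hhi hfuel h1 h2
    have : lo = hi := by omega
    subst this
    exact ⟨fun a ha halo => h1 a ha halo, fun b hb hge => h2 b hb hge⟩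
  | succ fuel ih =>
    intro lo hi hlohi hhi hfuel h1 h2
    by_cases hlt : lo < hi
    · have hmidlt : (lo + hi) / 2 < lst.length := by omega
      by_cases hv : lst[(lo + hi) / 2] < j
      · have hstep : bisectGE lst j lo hi (fuel + 1) = bisectGE lst j ((lo + hi) / 2 + 1) hi fuel := by
          conv_lhs => unfold bisectGE
          rw [if_pos hlt, List.getElem?_eq_getElem hmidlt]
          dsimp only
          rw [if_pos hv]
        rw [hstep]
        exact ih ((lo + hi) / 2 + 1) hi (by omega) hhi (by omega)
          (fun a ha halo => by
            rcases Nat.lt_or_ge a ((lo + hi) / 2) with h | h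
            · exact lt_trans (hsg a ((lo + hi) / 2) ha hmidlt h) hv
            · have : a = (lo + hi) / 2 := by omega
              subst this; exact hv)
          h2
      · have hstep : bisectGE lst j lo hi (fuel + 1) = bisectGE lst j lo ((lo + hi) / 2) fuel := by
          conv_lhs => unfold bisectGE
          rw [if_pos hlt, List.getElem?_eq_getElem hmidlt]
          dsimp only
          rw [if_neg hv]
        rw [hstep]
        exact ih lo ((lo + hi) / 2) (by omega) (by omega) (by omega) h1
          (fun b hb hge => by
            rcases Nat.lt_or_ge ((lo + hi) / 2) b with h | h
            · exact le_of_lt (lt_of_le_of_lt (le_of_not_gt hv) (hsg _ b hmidlt hb h))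
            · have : b = (lo + hi) / 2 := by omega
              subst this; exact le_of_not_gt hv)
    · have hstep : bisectGE lst j lo hi (fuel + 1) = lo := by
        conv_lhs => unfold bisectGE
        rw [if_neg hlt]
      rw [hstep]
      have : lo = hi := by omega
      subst this
      exact ⟨fun a ha halo => h1 a ha halo, fun b hb hge => h2 b hb hge⟩

-- the bisection result, read back through lst[lo]?, is the first element ≥ j
lemma bisect_getElem_eq_find? (lst : List Int) (j : Int) (hs : lst.Pairwise (· < ·)) :
    lst[bisectGE lst j 0 lst.length (lst.length + 1)]? = lst.find? (fun p => j ≤ p) := by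
  obtain ⟨h1, h2⟩ := bisect_go lst j hs (lst.length + 1) 0 lst.length (by omega) le_rfl (by omega)
    (by omega) (fun b hb hge => by omega)
  set r := bisectGE lst j 0 lst.length (lst.length + 1) with hr
  by_cases hrlen : r < lst.length
  · rw [List.getElem?_eq_getElem hrlen]
    symm
    rw [List.find?_eq_some_iff_getElem]
    refine ⟨by simpa using h2 r hrlen le_rfl, r, hrlen, rfl, fun a ha => by
      simpa using h1 a (by omega) ha⟩
  · rw [List.getElem?_eq_none_iff.mpr (by omega)]
    symm
    rw [List.find?_eq_none]
    intro x hx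
    obtain ⟨a, ha, hxa⟩ := List.mem_iff_getElem.mp hx
    have := h1 a ha (by omega)
    simp [← hxa]
    omega

lemma align_go_eq (tokens2 : List String) :
    ∀ (ts : List String) (j : Nat) (i : Int) (acc : List (Int × Int)),
      preGo tokens2 ts j = true →
      alignAGo tokens2 ts i ((j : Int) - i) acc = alignBGo tokens2 (buildPositions tokens2) ts i (j : Int) acc := by
  intro ts
  induction ts with
  | nil => intro j i acc _; rfl
  | cons t ts ih =>
    intro j i acc hpre
    simp only [preGo] at hpre
    by_cases hj : j < tokens2.length
    case neg => simp [nextIdx, hj] at hpre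
    case pos =>
    have hio : i + ((j : Int) - i) = (j : Int) := by ring
    have hget : PySem.List.pyGet? tokens2 (i + ((j : Int) - i)) = some tokens2[j] := by
      rw [hio]; simp [List.getElem?_eq_getElem hj]
    have hdrop : tokens2[j] :: tokens2.drop (j + 1) = tokens2.drop j := List.getElem_cons_drop hj
    have hslice : PySem.List.slice tokens2 (some (i + ((j : Int) - i))) none = tokens2.drop j := by
      rw [hio]; exact PySem.List.slice_from_natCast tokens2 j
    have hget' : PySem.List.pyGet? tokens2 ((j : Nat) : Int) = some tokens2[j] := by
      simp [List.getElem?_eq_getElem hj]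
    have hsorted : ((buildPositions tokens2).getD t []).Pairwise (· < ·) := by
      rw [buildPositions_getD]; exact posFrom_pairwise t tokens2 0
    have hBexact := (bisect_getElem_eq_find? ((buildPositions tokens2).getD t []) ((j : Nat) : Int)
      hsorted).trans (find_positions tokens2 t j hj.le)
    have hBstart := find_range tokens2 (fun s => PySem.Str.startswith s t) (tokens2.length - j) j (by omega)
    unfold alignAGo alignBGo
    rw [hget]
    dsimp only
    rw [hslice, hBexact, hBstart]
    by_cases hC1 : tokens2[j] = t ∨ t = ""
    · -- A's first branch: exact match at j, or empty token
      have hnext : nextIdx tokens2 t j = some j := by simp [nextIdx, hj, hC1]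
      rw [hnext] at hpre
      dsimp only at hpre
      rw [if_pos hC1]
      have e1 : (j : Int) - i = ((j + 1 : Nat) : Int) - (i + 1) := by push_cast; ring
      have e2 : ((j : Nat) : Int) + 1 = ((j + 1 : Nat) : Int) := by push_cast; ring
      -- B's first branch fires too
      have hC1' : t = "" ∨ PySem.List.pyGet? tokens2 ((j : Nat) : Int) = some t := by
        rcases hC1 with hjt | ht
        · exact Or.inr (by rw [hget', hjt])
        · exact Or.inl ht
      rw [if_pos ⟨by exact_mod_cast hj, hC1'⟩, hio, e1, e2]
      exact ih (j + 1) (i + 1) _ hpre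
    · -- A's later branches
      rw [if_neg hC1]
      have hB : ¬((j : Int) < (tokens2.length : Int) ∧
          (t = "" ∨ PySem.List.pyGet? tokens2 ((j : Nat) : Int) = some t)) := by
        rintro ⟨-, h | h⟩
        · exact hC1 (Or.inr h)
        · rw [hget'] at h
          exact hC1 (Or.inl (Option.some_inj.mp h))
      rw [if_neg hB]
      cases hfe : (tokens2.drop j).findIdx? (fun s => s == t) with
      | some d =>
        -- exact match at j + d
        have hdlen : d < (tokens2.drop j).length := (List.findIdx?_eq_some_iff_findIdx_eq.mp hfe).1
        have hmem : t ∈ tokens2.drop j := by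
          obtain ⟨hlt, hPd, -⟩ := List.findIdx?_eq_some_iff_getElem.mp hfe
          exact (beq_iff_eq.mp hPd) ▸ List.getElem_mem hlt
        have hcont : (tokens2.drop j).contains t = true := by simpa using hmem
        rw [if_pos hcont]
        have hnext : nextIdx tokens2 t j = some (j + d) := by
          unfold nextIdx
          rw [dif_pos hj, if_neg hC1, hfe]
        rw [hnext] at hpre
        dsimp only at hpre
        have hwhile : alignAWhile tokens2 (fun s2 => s2 == t) i ((j : Int) - i) tokens2.length
            = ((j : Int) - i) + d :=
          alignAWhile_eq tokens2 _ tokens2.length i _ j d hio hfe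
            (by rw [List.length_drop] at hdlen; omega)
        rw [hwhile]
        simp only [Option.map_some]
        have e3 : i + ((j : Int) - i + (d : Int)) = ((j + d : Nat) : Int) := by push_cast; ring
        have e1 : (j : Int) - i + (d : Int) = ((j + d + 1 : Nat) : Int) - (i + 1) := by push_cast; ring
        have e2 : ((j + d : Nat) : Int) + 1 = ((j + d + 1 : Nat) : Int) := by push_cast; ring
        rw [e3, e1, e2]
        exact ih (j + d + 1) (i + 1) _ hpre
      | none =>
        -- no exact match in the suffix
        have hnmem : t ∉ tokens2.drop j := by
          intro hmem
          have := List.findIdx?_eq_none_iff.mp hfe t hmem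
          simp at this
        have hncont : (tokens2.drop j).contains t = false := by simpa using hnmem
        rw [hncont]
        simp only [Bool.false_eq_true, if_false]
        cases hfs : (tokens2.drop j).findIdx? (fun s => PySem.Str.startswith s t) with
        | some d =>
          -- prefix match at j + d
          have hdlen : d < (tokens2.drop j).length := (List.findIdx?_eq_some_iff_findIdx_eq.mp hfs).1
          have hany : (tokens2.drop j).any (fun t2 => PySem.Str.startswith t2 t) = true := by
            obtain ⟨hlt, hPd, -⟩ := List.findIdx?_eq_some_iff_getElem.mp hfs
            exact List.any_eq_true.mpr ⟨_, List.getElem_mem hlt, hPd⟩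
          rw [if_pos hany]
          have hnext : nextIdx tokens2 t j = some (j + d) := by
            unfold nextIdx
            rw [dif_pos hj, if_neg hC1, hfe]
            dsimp only
            rw [hfs]
          rw [hnext] at hpre
          dsimp only at hpre
          have hwhile : alignAWhile tokens2 (fun t2 => PySem.Str.startswith t2 t) i ((j : Int) - i) tokens2.length
              = ((j : Int) - i) + d :=
            alignAWhile_eq tokens2 _ tokens2.length i _ j d hio hfs
              (by rw [List.length_drop] at hdlen; omega)
          rw [hwhile]
          simp only [Option.map_none, Option.map_some]
          have e3 : i + ((j : Int) - i + (d : Int)) = ((j + d : Nat) : Int) := by push_cast; ring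
          have e1 : (j : Int) - i + (d : Int) = ((j + d + 1 : Nat) : Int) - (i + 1) := by push_cast; ring
          have e2 : ((j + d : Nat) : Int) + 1 = ((j + d + 1 : Nat) : Int) := by push_cast; ring
          rw [e3, e1, e2]
          exact ih (j + d + 1) (i + 1) _ hpre
        | none =>
          -- A raises: excluded by Pre_
          have hnext : nextIdx tokens2 t j = none := by
            unfold nextIdx
            rw [dif_pos hj, if_neg hC1, hfe]
            dsimp only
            rw [hfs]
          rw [hnext] at hpre
          simp at hpre

-- ===== VERDICT (by name: the statement is the Claim_ definition above) =====
theorem align_indices_spec : Claim_equal_align_indices := by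
  intro tokens1 tokens2 _ hpre
  unfold Spec_align_indices align_indices align_indices_alt
  have h := align_go_eq tokens2 tokens1 0 0 [] hpre
  simpa using h
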